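-- pv_equiv track=rewrite | github.com/lindavik/mf-challenge | app/app/intercepted_converter.py | _process_schedule
-- ===== SOURCE A (Python) =====
-- from typing import Dict, List
--
-- def _process_schedule(raw_schedule: List) -> Dict:
--     schedule = {}
--     for item in raw_schedule:
--         key = item["planet"]
--         if key not in schedule.keys():
--             schedule[key] = {item["day"]}
--         else:
--             schedule[key].add(item["day"])
--     return schedule
-- ===== SOURCE B (Python) =====
-- def _process_schedule(raw_schedule):
--     # Two-pass decomposition: index the distinct planets first, then gather each planet's days.
--     planets = {item["planet"] for item in raw_schedule}
--     return {p: {it["day"] for it in raw_schedule if it["planet"] == p} for p in planets}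
-- ===== Notes on version B (the rewrite author's own statement) =====
-- stated objective: alternative
-- what changed: Replaces A's single incremental dict-mutation loop by an index-first-then-gather decomposition: one pass collects the set of distinct planets, then a dict comprehension builds each planet's day set with its own selecting scan.
import Mathlib
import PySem

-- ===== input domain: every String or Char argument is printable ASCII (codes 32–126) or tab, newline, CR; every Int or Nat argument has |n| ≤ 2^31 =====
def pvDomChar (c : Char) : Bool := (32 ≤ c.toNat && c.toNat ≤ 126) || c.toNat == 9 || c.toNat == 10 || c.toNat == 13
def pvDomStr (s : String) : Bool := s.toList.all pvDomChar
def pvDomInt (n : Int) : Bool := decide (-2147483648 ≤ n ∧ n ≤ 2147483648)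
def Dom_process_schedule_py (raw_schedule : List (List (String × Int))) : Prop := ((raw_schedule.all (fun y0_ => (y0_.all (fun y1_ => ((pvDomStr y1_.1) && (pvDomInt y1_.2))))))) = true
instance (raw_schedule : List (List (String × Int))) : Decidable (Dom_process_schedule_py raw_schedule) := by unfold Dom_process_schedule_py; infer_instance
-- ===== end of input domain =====

-- B replaces A's single incremental dict-mutation loop by an index-planets-first, gather-days-per-planet decomposition (same results, not claimed faster).

-- shared item accessors: item["planet"] / item["day"] (total under Pre_, which guarantees both keys)
def pvKey (it : List (String × Int)) : Int := (PySem.Dict.mk it).getD "planet" 0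
def pvDay (it : List (String × Int)) : Int := (PySem.Dict.mk it).getD "day" 0

-- ===== PORT A =====
-- loop body of A: key = item["planet"]; if key not in schedule: schedule[key] = {item["day"]} else: schedule[key].add(item["day"])
def pvStep (schedule : PySem.Dict Int (PySem.Set Int)) (item : List (String × Int)) : PySem.Dict Int (PySem.Set Int) :=
  let key := pvKey item
  if !(schedule.contains key) then
    schedule.insert key (PySem.Set.ofList [pvDay item])
  else
    schedule.modify key PySem.Set.empty (fun s => s.add (pvDay item))

def process_schedule_py (raw_schedule : List (List (String × Int))) : List (Int × List Int) :=
  (raw_schedule.foldl pvStep PySem.Dict.empty).items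

-- ===== PORT B =====
-- days of the items whose planet is p, in scan order (inner gather of Source B)
def pvDays (p : Int) (raw_schedule : List (List (String × Int))) : List Int :=
  (raw_schedule.filter (fun it => pvKey it == p)).map pvDay

def process_schedule_py_alt (raw_schedule : List (List (String × Int))) : List (Int × List Int) :=
  let planets := PySem.Set.ofList (raw_schedule.map pvKey)
  planets.map (fun p => (p, PySem.Set.ofList (pvDays p raw_schedule)))

-- ===== PRECONDITION & SPEC =====
-- Pre_: every item has both a "planet" and a "day" key; on any other item A raises KeyError.
def Pre_process_schedule_py (raw_schedule : List (List (String × Int))) : Prop :=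
  (raw_schedule.all (fun it => (PySem.Dict.mk it).contains "planet" && (PySem.Dict.mk it).contains "day")) = true
instance (raw_schedule : List (List (String × Int))) : Decidable (Pre_process_schedule_py raw_schedule) := by unfold Pre_process_schedule_py; infer_instance

def pvWitness_process_schedule_py : (List (List (String × Int))) :=
  [[("planet", 1), ("day", 2)], [("planet", 1), ("day", 3)], [("planet", 4), ("day", 2)]]

def Spec_process_schedule_py (raw_schedule : List (List (String × Int))) (out : List (Int × List Int)) : Prop := out = process_schedule_py_alt raw_schedule
instance (raw_schedule : List (List (String × Int))) (out : List (Int × List Int)) : Decidable (Spec_process_schedule_py raw_schedule out) := by unfold Spec_process_schedule_py; infer_instance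

-- ===== CLAIM (what is proved, stated in full; the proofs are below) =====
def Claim_equal_process_schedule_py : Prop := ∀ (raw_schedule : List (List (String × Int))), Dom_process_schedule_py raw_schedule → Pre_process_schedule_py raw_schedule → Spec_process_schedule_py raw_schedule (process_schedule_py raw_schedule)

-- ===== LEMMAS AND PROOFS =====

lemma pvDays_cons (p : Int) (it : List (String × Int)) (rest : List (List (String × Int))) :
    pvDays p (it :: rest) = if pvKey it == p then pvDay it :: pvDays p rest else pvDays p rest := by
  simp only [pvDays, List.filter_cons]
  split <;> simp

lemma pvDays_cons_self (it : List (String × Int)) (rest : List (List (String × Int))) :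
    pvDays (pvKey it) (it :: rest) = pvDay it :: pvDays (pvKey it) rest := by
  simp [pvDays_cons]

lemma pvDays_cons_ne (p : Int) (it : List (String × Int)) (rest : List (List (String × Int)))
    (h : pvKey it ≠ p) : pvDays p (it :: rest) = pvDays p rest := by
  simp [pvDays_cons, h]

-- the loop invariant: folding A's step over rs extends d's entries with the days of rs and appends the new planets
lemma pv_fold_items (rs : List (List (String × Int))) : ∀ (d : PySem.Dict Int (PySem.Set Int)), d.keys.Nodup →
    (rs.foldl pvStep d).items =
      d.items.map (fun q => (q.1, PySem.Set.update q.2 (pvDays q.1 rs)))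
      ++ ((PySem.Set.ofList (rs.map pvKey)).filter (fun p => !(d.contains p))).map
           (fun p => (p, PySem.Set.ofList (pvDays p rs))) := by
  induction rs with
  | nil => intro d _; simp [pvDays, PySem.Set.update_nil]
  | cons it rest ih =>
    intro d hnd
    have hkeys : PySem.Set.ofList ((it :: rest).map pvKey)
        = pvKey it :: (PySem.Set.ofList (rest.map pvKey)).discard (pvKey it) := by
      simp [PySem.Set.ofList_cons]
    by_cases hc : d.contains (pvKey it) = true
    · -- existing planet: schedule[key].add(day)
      have hstep : pvStep d it = d.insert (pvKey it) ((d.getD (pvKey it) PySem.Set.empty).add (pvDay it)) := by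
        simp [pvStep, hc, PySem.Dict.modify]
      have hnd' : (pvStep d it).keys.Nodup := by
        rw [hstep]; exact PySem.Dict.nodup_keys_insert d _ _ hnd
      rw [List.foldl_cons, ih (pvStep d it) hnd', hstep,
        PySem.Dict.items_insert_of_contains d _ hc]
      rw [List.map_map]
      congr 1
      · -- old entries
        apply List.map_congr_left
        intro q hq
        by_cases hqk : q.1 = pvKey it
        · have hget : d.getD (pvKey it) PySem.Set.empty = q.2 := by
            apply PySem.Dict.getD_of_mem_items d _ hnd
            rw [← hqk]; exact hq
          simp [hqk, pvDays_cons_self, PySem.Set.update_cons]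
          rw [show d.getD (pvKey it) ([] : PySem.Set Int) = q.2 from hget]
        · simp [hqk, pvDays_cons_ne _ it rest (fun h => hqk h.symm)]
      · -- new planets: the filter ignores the already-present key
        rw [hkeys]
        have hcontains : ∀ p, ((d.insert (pvKey it) ((d.getD (pvKey it) PySem.Set.empty).add (pvDay it))).contains p)
            = (p == pvKey it || d.contains p) := fun p => PySem.Dict.contains_insert d _ p _
        simp only [List.filter_cons, hcontains, Bool.not_true, Bool.false_eq_true, if_false, hc]
        simp only [PySem.Set.discard]
        rw [List.filter_filter]
        have hfil : ∀ p, (((!(p == pvKey it || d.contains p)) : Bool))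
            = ((!(d.contains p)) && !(p == pvKey it)) := by
          intro p
          by_cases hp : p = pvKey it
          · subst hp; simp [hc]
          · simp [Bool.and_comm]
        rw [List.filter_congr (fun p _ => hfil p)]
        apply List.map_congr_left
        intro p hp
        have hpk : pvKey it ≠ p := by
          rcases List.mem_filter.mp hp with ⟨_, hpq⟩
          intro h
          simp [← h, hc] at hpq
        rw [pvDays_cons_ne p it rest hpk]
    · -- new planet: schedule[key] = {day}
      have hc' : d.contains (pvKey it) = false := by simpa using hc
      have hstep : pvStep d it = d.insert (pvKey it) (PySem.Set.ofList [pvDay it]) := by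
        simp [pvStep, hc']
      have hnd' : (pvStep d it).keys.Nodup := by
        rw [hstep]; exact PySem.Dict.nodup_keys_insert d _ _ hnd
      rw [List.foldl_cons, ih (pvStep d it) hnd', hstep,
        PySem.Dict.items_insert_of_not_contains d _ hc']
      rw [List.map_append, List.append_assoc]
      congr 1
      · -- old entries: their planets differ from the new key
        apply List.map_congr_left
        intro q hq
        have hqk : pvKey it ≠ q.1 := by
          intro h
          have : q.1 ∈ d.keys := PySem.Dict.mem_keys_of_mem_items d hq
          rw [← h] at this
          rw [← PySem.Dict.contains_iff_mem_keys] at this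
          simp [this] at hc'
        rw [pvDays_cons_ne q.1 it rest hqk]
      · -- the freshly inserted planet heads the new part
        rw [hkeys]
        simp only [List.filter_cons]
        have hcontains : ∀ p, ((d.insert (pvKey it) (PySem.Set.ofList [pvDay it])).contains p)
            = (p == pvKey it || d.contains p) := fun p => PySem.Dict.contains_insert d _ p _
        simp only [hcontains, hc', Bool.not_true, Bool.false_eq_true, if_false, if_true]
        simp only [List.map_cons, List.map_nil, List.singleton_append]
        congr 1
        · -- the freshly created singleton set, updated with the later days of the same planet
          beta_reduce
          rw [pvDays_cons_self it rest]
          rw [show PySem.Set.ofList [pvDay it] = PySem.Set.add PySem.Set.empty (pvDay it) from rfl]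
          rw [← PySem.Set.update_cons]
          rfl
        simp only [PySem.Set.discard]
        rw [List.filter_filter]
        have hfil : ∀ p, (((!(p == pvKey it || d.contains p)) : Bool))
            = ((!(d.contains p)) && !(p == pvKey it)) := by
          intro p
          by_cases hp : p = pvKey it
          · subst hp; simp [hc']
          · simp [Bool.and_comm]
        rw [List.filter_congr (fun p _ => hfil p)]
        apply List.map_congr_left
        intro p hp
        have hpk : pvKey it ≠ p := by
          rcases List.mem_filter.mp hp with ⟨_, hpq⟩
          intro h
          simp [← h] at hpq
        rw [pvDays_cons_ne p it rest hpk]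

-- ===== VERDICT (by name: the statement is the Claim_ definition above) =====
theorem process_schedule_py_spec : Claim_equal_process_schedule_py := by
  intro rs _ _
  unfold Spec_process_schedule_py process_schedule_py process_schedule_py_alt
  rw [pv_fold_items rs PySem.Dict.empty (by simp [PySem.Dict.empty, PySem.Dict.keys])]
  simp [PySem.Dict.empty]
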